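-- pv_equiv track=rewrite | github.com/locbp-uzh/biopipelines | HelpScripts/pipe_selection_editor.py | invert_selection
-- ===== SOURCE A (Python) =====
-- from typing import List, Tuple, Set
--
-- def invert_selection(ranges: List[Tuple[int, int]],
--                     valid_residues: Set[int]) -> List[Tuple[int, int]]:
--     """
--     Invert selection to get complement (all residues NOT in selection).
--
--     Args:
--         ranges: List of (start, end) tuples representing current selection
--         valid_residues: Set of valid residue numbers from PDB
--
--     Returns:
--         Inverted selection ranges
--     """
--     # Get all selected residues
--     selected = set()
--     for start, end in ranges:
--         for res in range(start, end + 1):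
--             if res in valid_residues:
--                 selected.add(res)
--
--     # Get complement
--     inverted_residues = valid_residues - selected
--
--     if not inverted_residues:
--         return []
--
--     # Convert back to ranges
--     sorted_residues = sorted(inverted_residues)
--     ranges = []
--     start = sorted_residues[0]
--     end = sorted_residues[0]
--
--     for res in sorted_residues[1:]:
--         if res == end + 1:
--             end = res
--         else:
--             ranges.append((start, end))
--             start = res
--             end = res
--
--     ranges.append((start, end))
--     return ranges
-- ===== SOURCE B (Python) =====
-- def invert_selection(ranges, valid_residues):
--     """Complement of the selection over the valid residues.
--
--     Instead of expanding every range span into a set and taking a set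
--     difference (A), sort the ranges by start and sweep once over the sorted
--     valid residues, keeping a running maximum of the ends of the ranges whose
--     start has been passed: a residue is covered iff that maximum reaches it.
--     The surviving ascending residues are cut into maximal consecutive runs.
--     """
--     rem = sorted(ranges, key=lambda p: p[0])
--     j = 0
--     max_end = None
--     residues = []
--     for r in sorted(valid_residues):
--         while j < len(rem) and rem[j][0] <= r:
--             e = rem[j][1]
--             if max_end is None or e > max_end:
--                 max_end = e
--             j += 1
--         if max_end is None or r > max_end:
--             residues.append(r)
--     out = []
--     k = 0
--     n = len(residues)
--     while k < n:
--         start = end = residues[k]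
--         k += 1
--         while k < n and residues[k] == end + 1:
--             end = residues[k]
--             k += 1
--         out.append((start, end))
--     return out
-- ===== Notes on version B (the rewrite author's own statement) =====
-- stated objective: alternative
-- what changed: A expands every range span residue-by-residue into a 'selected' set and subtracts it from the valid set before sorting; B never materialises the spans: it sorts the ranges by start, sweeps once over the sorted valid residues keeping a running maximum of the ends of the ranges already passed (a residue is covered iff that maximum reaches it), and cuts the surviving ascending residues into maximal consecutive runs with a two-index sweep.
import Mathlib
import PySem

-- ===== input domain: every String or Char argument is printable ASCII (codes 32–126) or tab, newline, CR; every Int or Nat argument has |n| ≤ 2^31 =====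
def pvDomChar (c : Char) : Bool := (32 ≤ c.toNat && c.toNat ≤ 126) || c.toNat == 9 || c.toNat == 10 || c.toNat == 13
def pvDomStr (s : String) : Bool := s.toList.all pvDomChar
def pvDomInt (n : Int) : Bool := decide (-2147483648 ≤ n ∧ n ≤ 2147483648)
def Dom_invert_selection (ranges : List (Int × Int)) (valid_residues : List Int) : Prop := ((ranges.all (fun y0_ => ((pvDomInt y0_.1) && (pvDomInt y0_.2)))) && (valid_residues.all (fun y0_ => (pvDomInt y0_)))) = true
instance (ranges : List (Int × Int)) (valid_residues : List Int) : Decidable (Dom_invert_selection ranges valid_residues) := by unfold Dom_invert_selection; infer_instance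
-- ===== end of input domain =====

-- B replaces A's span-expansion + set-difference by filtering the sorted valid residues with a direct interval test and grouping runs (alternative algorithm, same result).


-- ===== PORT A =====
def invert_selection (ranges : List (Int × Int)) (valid_residues : List Int) : List (Int × Int) :=
  -- selected = set(); for start, end in ranges: for res in range(start, end+1): if res in valid_residues: selected.add(res)
  let selected : PySem.Set Int := ranges.foldl (fun sel p =>
      (PySem.List.pyRange p.1 (p.2 + 1) 1).foldl (fun sel res =>
        if valid_residues.contains res then PySem.Set.add sel res else sel) sel)
    PySem.Set.empty
  let inverted := PySem.Set.diff (PySem.Set.ofList valid_residues) selected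
  if inverted.isEmpty then []
  else
    let sorted_residues := PySem.List.sorted inverted (fun x => x) false
    let first := PySem.List.pyGetD sorted_residues 0 0
    let st := (PySem.List.slice sorted_residues (some 1) none).foldl
        (fun (st : List (Int × Int) × Int × Int) res =>
          if res = st.2.2 + 1 then (st.1, st.2.1, res)
          else (st.1 ++ [(st.2.1, st.2.2)], res, res)) ([], first, first)
    st.1 ++ [(st.2.1, st.2.2)]

-- ===== PORT B =====
-- Source B's running "max_end" (None until a range start has been passed)
def pvMaxOpt (me : Option Int) (e : Int) : Option Int :=
  match me with
  | none => some e
  | some m => if e > m then some e else some m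

-- the coverage test 'max_end is not None and r <= max_end'
def pvMeGE (me : Option Int) (r : Int) : Bool :=
  match me with
  | none => false
  | some m => decide (r ≤ m)

-- Source B's inner while loop: consume the sorted ranges whose start is ≤ r, folding their ends into max_end
def pvAdvance (r : Int) : List (Int × Int) → Option Int → List (Int × Int) × Option Int
  | [], me => ([], me)
  | p :: t, me => if p.1 ≤ r then pvAdvance r t (pvMaxOpt me p.2) else (p :: t, me)

-- Source B's main for loop: keep the residues the running maximum does not reach
def pvSweep (rem : List (Int × Int)) (me : Option Int) : List Int → List Int
  | [] => []
  | r :: rest =>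
    let st := pvAdvance r rem me
    if pvMeGE st.2 r then pvSweep st.1 st.2 rest
    else r :: pvSweep st.1 st.2 rest

-- the inner while loop of the grouping pass of Source B: extend the current run [s, e] while the next residue is e+1
def pvRuns (s e : Int) : List Int → List (Int × Int)
  | [] => [(s, e)]
  | r :: rs => if r = e + 1 then pvRuns s r rs else (s, e) :: pvRuns r r rs

-- the outer while loop of the grouping pass of Source B: start a new run at each remaining residue
def pvGroupRuns : List Int → List (Int × Int)
  | [] => []
  | r :: rs => pvRuns r r rs

def invert_selection_alt (ranges : List (Int × Int)) (valid_residues : List Int) : List (Int × Int) :=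
  let rem := PySem.List.sorted ranges (fun p => p.1) false
  let residues := pvSweep rem none
      (PySem.List.sorted (PySem.Set.ofList valid_residues) (fun x => x) false)
  pvGroupRuns residues

-- ===== PRECONDITION & SPEC =====
def Spec_invert_selection (ranges : List (Int × Int)) (valid_residues : List Int) (out : List (Int × Int)) : Prop := out = invert_selection_alt ranges valid_residues
instance (ranges : List (Int × Int)) (valid_residues : List Int) (out : List (Int × Int)) : Decidable (Spec_invert_selection ranges valid_residues out) := by unfold Spec_invert_selection; infer_instance

-- ===== CLAIM (what is proved, stated in full; the proofs are below) =====
def Claim_equal_invert_selection : Prop := ∀ (ranges : List (Int × Int)) (valid_residues : List Int), Dom_invert_selection ranges valid_residues → Spec_invert_selection ranges valid_residues (invert_selection ranges valid_residues)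

-- ===== LEMMAS AND PROOFS =====

-- proof-side notion: residue r is covered by some range
def pvCovered (ranges : List (Int × Int)) (r : Int) : Bool :=
  ranges.any (fun p => decide (p.1 ≤ r) && decide (r ≤ p.2))

-- pvAdvance is takeWhile/dropWhile plus a fold of the consumed ends
lemma pv_advance_eq (r : Int) (rem : List (Int × Int)) (me : Option Int) :
    pvAdvance r rem me =
      (rem.dropWhile (fun p => decide (p.1 ≤ r)),
       (rem.takeWhile (fun p => decide (p.1 ≤ r))).foldl (fun me p => pvMaxOpt me p.2) me) := by
  induction rem generalizing me with
  | nil => rfl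
  | cons p t ih =>
    by_cases hp : p.1 ≤ r
    · simp [pvAdvance, hp, ih]
    · simp [pvAdvance, hp]

lemma pv_meGE_maxOpt (me : Option Int) (e x : Int) :
    pvMeGE (pvMaxOpt me e) x = (pvMeGE me x || decide (x ≤ e)) := by
  cases me with
  | none => simp [pvMaxOpt, pvMeGE]
  | some m =>
    by_cases h : e > m <;> simp [pvMaxOpt, pvMeGE, h] <;> omega

lemma pv_meGE_foldl (l : List (Int × Int)) (me : Option Int) (x : Int) :
    pvMeGE (l.foldl (fun me p => pvMaxOpt me p.2) me) x =
      (pvMeGE me x || l.any (fun p => decide (x ≤ p.2))) := by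
  induction l generalizing me with
  | nil => simp
  | cons p t ih => simp [ih, pv_meGE_maxOpt, Bool.or_assoc]

-- every range left behind by dropWhile starts after r (needs sortedness by start)
lemma pv_dropWhile_start_gt (r : Int) (rem : List (Int × Int))
    (h : rem.Pairwise (fun a b => a.1 ≤ b.1)) :
    ∀ p ∈ rem.dropWhile (fun p => decide (p.1 ≤ r)), r < p.1 := by
  induction rem with
  | nil => simp
  | cons a t ih =>
    rcases List.pairwise_cons.mp h with ⟨ha, ht⟩
    by_cases hq : a.1 ≤ r
    · simpa [List.dropWhile_cons, hq] using ih ht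
    · intro p hp
      rw [List.dropWhile_cons, if_neg (by simpa using hq)] at hp
      rcases List.mem_cons.mp hp with rfl | hp
      · omega
      · have := ha p hp; omega

-- the sweep computes exactly the filter by non-coverage
lemma pv_sweep_eq (all : List (Int × Int)) (l : List Int) :
    ∀ (rem done : List (Int × Int)) (me : Option Int),
      all.Perm (done ++ rem) →
      rem.Pairwise (fun a b => a.1 ≤ b.1) →
      l.Pairwise (· ≤ ·) →
      (∀ p ∈ done, ∀ x ∈ l, p.1 ≤ x) →
      (∀ x, pvMeGE me x = true ↔ ∃ p ∈ done, x ≤ p.2) →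
      pvSweep rem me l = l.filter (fun r => ! pvCovered all r) := by
  induction l with
  | nil => intro rem done me _ _ _ _ _; rfl
  | cons r rest ih =>
    intro rem done me hperm hrem hl hdone hme
    rcases List.pairwise_cons.mp hl with ⟨hr_rest, hrest⟩
    set consumed := rem.takeWhile (fun p => decide (p.1 ≤ r)) with hc
    set rem' := rem.dropWhile (fun p => decide (p.1 ≤ r)) with hd
    set me' := consumed.foldl (fun me p => pvMaxOpt me p.2) me with hm
    have hsplit : rem = consumed ++ rem' := (List.takeWhile_append_dropWhile).symm
    have hme' : ∀ x, pvMeGE me' x = true ↔ ∃ p ∈ done ++ consumed, x ≤ p.2 := by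
      intro x
      rw [hm, pv_meGE_foldl, Bool.or_eq_true, hme, List.any_eq_true]
      constructor
      · rintro (⟨p, hp, h⟩ | ⟨p, hp, h⟩)
        · exact ⟨p, List.mem_append_left _ hp, h⟩
        · exact ⟨p, List.mem_append_right _ hp, by simpa using h⟩
      · rintro ⟨p, hp, h⟩
        rcases List.mem_append.mp hp with hp | hp
        · exact Or.inl ⟨p, hp, h⟩
        · exact Or.inr ⟨p, hp, by simpa using h⟩
    have hcov : pvMeGE me' r = pvCovered all r := by
      rw [Bool.eq_iff_iff, hme', pvCovered, List.any_eq_true]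
      constructor
      · rintro ⟨p, hp, h⟩
        have hp1 : p.1 ≤ r := by
          rcases List.mem_append.mp hp with hp | hp
          · exact hdone p hp r (List.mem_cons_self ..)
          · exact of_decide_eq_true (List.mem_takeWhile_imp (l := rem) (hc ▸ hp))
        exact ⟨p, hperm.mem_iff.mpr (by rw [hsplit] at *; simp at hp ⊢; tauto), by simp; omega⟩
      · rintro ⟨p, hp, h⟩
        simp only [Bool.and_eq_true, decide_eq_true_eq] at h
        have hp' : p ∈ done ++ rem := hperm.mem_iff.mp hp
        refine ⟨p, ?_, h.2⟩
        rcases List.mem_append.mp hp' with hpd | hpr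
        · exact List.mem_append_left _ hpd
        · rw [hsplit] at hpr
          rcases List.mem_append.mp hpr with hpc | hpr'
          · exact List.mem_append_right _ hpc
          · exact absurd (pv_dropWhile_start_gt r rem hrem p (hd ▸ hpr')) (by omega)
    have hrec : pvSweep rem' me' rest = rest.filter (fun r => ! pvCovered all r) := by
      refine ih rem' (done ++ consumed) me' ?_ ?_ hrest ?_ hme'
      · refine hperm.trans ?_
        rw [hsplit, List.append_assoc]
      · exact hrem.sublist (hd ▸ List.dropWhile_sublist _)
      · intro p hp x hx
        rcases List.mem_append.mp hp with hpd | hpc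
        · exact hdone p hpd x (List.mem_cons_of_mem _ hx)
        · have h1 : p.1 ≤ r := of_decide_eq_true (List.mem_takeWhile_imp (l := rem) (hc ▸ hpc))
          have h2 := hr_rest x hx
          omega
    rw [pvSweep, pv_advance_eq, ← hc, ← hd, ← hm]
    simp only [List.filter_cons]
    by_cases hcase : pvMeGE me' r = true
    · rw [if_pos hcase, hrec]
      have : pvCovered all r = true := hcov ▸ hcase
      simp [this]
    · rw [if_neg hcase, hrec]
      have : pvCovered all r = false := by rw [← hcov]; simpa using hcase
      simp [this]

-- B's sweep over the sorted inputs is the non-coverage filter of the sorted valid residues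
lemma pv_sweep_filter (ranges : List (Int × Int)) (valid : List Int) :
    pvSweep (PySem.List.sorted ranges (fun p => p.1) false) none
        (PySem.List.sorted (PySem.Set.ofList valid) (fun x => x) false) =
      (PySem.List.sorted (PySem.Set.ofList valid) (fun x => x) false).filter
        (fun r => ! pvCovered ranges r) := by
  refine pv_sweep_eq ranges _ _ [] none ?_ ?_ ?_ (by simp) (by simp [pvMeGE])
  · simpa using (PySem.List.sorted_perm ranges (fun p => p.1) false).symm
  · exact PySem.List.sorted_pairwise ranges (fun p => p.1)
  · exact (PySem.List.sorted_ofList_pairwise_lt valid).imp le_of_lt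


-- membership in the inner add-if fold of A
lemma pv_mem_inner (valid : List Int) (l : List Int) (sel : PySem.Set Int) (x : Int) :
    x ∈ l.foldl (fun sel res => if valid.contains res then PySem.Set.add sel res else sel) sel ↔
      x ∈ sel ∨ (x ∈ l ∧ x ∈ valid) := by
  induction l generalizing sel with
  | nil => simp
  | cons a l ih =>
    simp only [List.foldl_cons, ih, List.mem_cons]
    by_cases ha : valid.contains a = true
    · have ha' : a ∈ valid := List.contains_iff_mem.mp ha
      rw [if_pos ha]
      simp only [PySem.Set.mem_add]
      constructor
      · rintro (⟨h | rfl⟩ | ⟨h1, h2⟩)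
        · exact Or.inl h
        · exact Or.inr ⟨Or.inl rfl, ha'⟩
        · exact Or.inr ⟨Or.inr h1, h2⟩
      · rintro (h | ⟨rfl | h1, h2⟩)
        · exact Or.inl (Or.inl h)
        · exact Or.inl (Or.inr rfl)
        · exact Or.inr ⟨h1, h2⟩
    · have ha' : a ∉ valid := fun hm => ha (List.contains_iff_mem.mpr hm)
      rw [if_neg ha]
      constructor
      · rintro (h | ⟨h1, h2⟩)
        · exact Or.inl h
        · exact Or.inr ⟨Or.inr h1, h2⟩
      · rintro (h | ⟨rfl | h1, h2⟩)
        · exact Or.inl h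
        · exact absurd h2 ha'
        · exact Or.inr ⟨h1, h2⟩

-- membership in A's 'selected' set
lemma pv_mem_selected (ranges : List (Int × Int)) (valid : List Int) (sel : PySem.Set Int) (x : Int) :
    x ∈ ranges.foldl (fun sel p =>
        (PySem.List.pyRange p.1 (p.2 + 1) 1).foldl (fun sel res =>
          if valid.contains res then PySem.Set.add sel res else sel) sel) sel ↔
      x ∈ sel ∨ (x ∈ valid ∧ ∃ p ∈ ranges, p.1 ≤ x ∧ x ≤ p.2) := by
  induction ranges generalizing sel with
  | nil => simp
  | cons q qs ih =>
    simp only [List.foldl_cons, ih, pv_mem_inner, PySem.List.mem_pyRange_one]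
    constructor
    · rintro (⟨h | ⟨h1, h2⟩⟩ | ⟨hv, p, hp, h⟩)
      · exact Or.inl h
      · exact Or.inr ⟨h2, q, List.mem_cons_self .., by omega⟩
      · exact Or.inr ⟨hv, p, List.mem_cons_of_mem _ hp, h⟩
    · rintro (h | ⟨hv, p, hp, h⟩)
      · exact Or.inl (Or.inl h)
      · rcases List.mem_cons.mp hp with rfl | hp
        · exact Or.inl (Or.inr ⟨by omega, hv⟩)
        · exact Or.inr ⟨hv, p, hp, h⟩

-- A's grouping fold equals B's run recursion, for any accumulator
lemma pv_fold_runs (l : List Int) (acc : List (Int × Int)) (s e : Int) :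
    (let st := l.foldl (fun (st : List (Int × Int) × Int × Int) res =>
        if res = st.2.2 + 1 then (st.1, st.2.1, res)
        else (st.1 ++ [(st.2.1, st.2.2)], res, res)) (acc, s, e)
     st.1 ++ [(st.2.1, st.2.2)]) = acc ++ pvRuns s e l := by
  induction l generalizing acc s e with
  | nil => simp [pvRuns]
  | cons r rs ih =>
    simp only [List.foldl_cons, pvRuns]
    by_cases h : r = e + 1
    · simp only [h, ih, if_true]
    · simp only [if_neg h, ih, List.append_assoc, List.cons_append, List.nil_append]

-- A's sorted complement list is B's filtered sorted list
lemma pv_sorted_eq (ranges : List (Int × Int)) (valid : List Int) :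
    PySem.List.sorted
        (PySem.Set.diff (PySem.Set.ofList valid)
          (ranges.foldl (fun sel p =>
            (PySem.List.pyRange p.1 (p.2 + 1) 1).foldl (fun sel res =>
              if valid.contains res then PySem.Set.add sel res else sel) sel)
            PySem.Set.empty)) (fun x => x) false =
      (PySem.List.sorted (PySem.Set.ofList valid) (fun x => x) false).filter
        (fun r => ! pvCovered ranges r) := by
  apply PySem.List.sorted_eq_of_perm_of_pairwise_lt
  · -- permutation
    have h1 : (PySem.List.sorted (PySem.Set.ofList valid) (fun x => x) false).Perm
        (PySem.Set.ofList valid) := PySem.List.sorted_perm ..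
    have h2 := h1.filter (fun r => ! pvCovered ranges r)
    refine h2.trans ?_
    have : ∀ xs : List Int, (∀ x ∈ xs, x ∈ valid) →
        xs.filter (fun r => ! pvCovered ranges r) =
        xs.filter (fun x => !(ranges.foldl (fun sel p =>
            (PySem.List.pyRange p.1 (p.2 + 1) 1).foldl (fun sel res =>
              if valid.contains res then PySem.Set.add sel res else sel) sel)
            PySem.Set.empty).contains x) := by
      intro xs hxs
      apply List.filter_congr
      intro x hx
      have hxv : x ∈ valid := hxs x hx
      have hmem : (x ∈ (ranges.foldl (fun sel p =>
          (PySem.List.pyRange p.1 (p.2 + 1) 1).foldl (fun sel res =>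
            if valid.contains res then PySem.Set.add sel res else sel) sel)
          PySem.Set.empty)) ↔ (pvCovered ranges x = true) := by
        rw [pv_mem_selected]
        simp [PySem.Set.empty, pvCovered, hxv, List.any_eq_true]
      have hc : (ranges.foldl (fun sel p =>
          (PySem.List.pyRange p.1 (p.2 + 1) 1).foldl (fun sel res =>
            if valid.contains res then PySem.Set.add sel res else sel) sel)
          PySem.Set.empty).contains x = pvCovered ranges x := by
        rw [Bool.eq_iff_iff, PySem.Set.contains, List.contains_iff_mem]
        exact hmem
      rw [hc]
    rw [this (PySem.Set.ofList valid) (fun x hx => (PySem.Set.mem_ofList valid x).mp hx)]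
    exact List.Perm.refl _
  · exact (PySem.List.sorted_ofList_pairwise_lt valid).filter _

-- ===== VERDICT (by name: the statement is the Claim_ definition above) =====
theorem invert_selection_spec : Claim_equal_invert_selection := by
  intro ranges valid _
  unfold Spec_invert_selection
  simp only [invert_selection, invert_selection_alt, pv_sweep_filter, pv_sorted_eq]
  have hperm : ((PySem.List.sorted (PySem.Set.ofList valid) (fun x => x) false).filter
      (fun r => ! pvCovered ranges r)).Perm
      (PySem.Set.diff (PySem.Set.ofList valid)
        (ranges.foldl (fun sel p =>
          (PySem.List.pyRange p.1 (p.2 + 1) 1).foldl (fun sel res =>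
            if valid.contains res then PySem.Set.add sel res else sel) sel)
          PySem.Set.empty)) := by
    rw [← pv_sorted_eq]
    exact PySem.List.sorted_perm ..
  by_cases hE : PySem.Set.diff (PySem.Set.ofList valid)
      (ranges.foldl (fun sel p =>
        (PySem.List.pyRange p.1 (p.2 + 1) 1).foldl (fun sel res =>
          if valid.contains res then PySem.Set.add sel res else sel) sel)
        PySem.Set.empty) = []
  · have hres : (PySem.List.sorted (PySem.Set.ofList valid) (fun x => x) false).filter
        (fun r => ! pvCovered ranges r) = [] := (hE ▸ hperm).eq_nil
    rw [hres, hE]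
    simp [pvGroupRuns]
  · rw [if_neg (by simpa [List.isEmpty_iff] using hE)]
    rcases hres : (PySem.List.sorted (PySem.Set.ofList valid) (fun x => x) false).filter
        (fun r => ! pvCovered ranges r) with _ | ⟨r, rs⟩
    · exact absurd ((hres ▸ hperm).symm.eq_nil) hE
    · simp only [PySem.List.pyGetD_zero_cons, PySem.List.slice_from_one, List.tail_cons,
        pvGroupRuns]
      simpa using pv_fold_runs rs [] r r
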